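-- pv_equiv track=rewrite | github.com/marioahn/Algorithm-programmers-and-baekjoon | 프로그래머스/1/133502. 햄버거 만들기/햄버거 만들기.py | solution
-- ===== SOURCE A (Python) =====
-- def solution(ingredient):
--     cnt = 0
--     bucket = []
--     for ele in ingredient:
--         bucket.append(ele)
--         if bucket[-4::] == [1,2,3,1]:
--             cnt += 1
--             # bucket = bucket[:-4]
--             del bucket[-4::]
--
--     return cnt
-- ===== SOURCE B (Python) =====
-- def _find(lst):
--     for i in range(len(lst)):
--         if lst[i:i+4] == [1, 2, 3, 1]:
--             return i
--     return None
--
-- def solution(ingredient):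
--     lst = list(ingredient)
--     cnt = 0
--     while True:
--         i = _find(lst)
--         if i is None:
--             return cnt
--         del lst[i:i+4]
--         cnt += 1
-- ===== Notes on version B (the rewrite author's own statement) =====
-- stated objective: alternative
-- what changed: A does one left-to-right pass keeping a stack and popping whenever its top four elements are [1,2,3,1]; B instead reduces a copy of the list to a fixpoint by repeatedly finding the leftmost [1,2,3,1] window and deleting it, counting deletions.
import Mathlib
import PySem

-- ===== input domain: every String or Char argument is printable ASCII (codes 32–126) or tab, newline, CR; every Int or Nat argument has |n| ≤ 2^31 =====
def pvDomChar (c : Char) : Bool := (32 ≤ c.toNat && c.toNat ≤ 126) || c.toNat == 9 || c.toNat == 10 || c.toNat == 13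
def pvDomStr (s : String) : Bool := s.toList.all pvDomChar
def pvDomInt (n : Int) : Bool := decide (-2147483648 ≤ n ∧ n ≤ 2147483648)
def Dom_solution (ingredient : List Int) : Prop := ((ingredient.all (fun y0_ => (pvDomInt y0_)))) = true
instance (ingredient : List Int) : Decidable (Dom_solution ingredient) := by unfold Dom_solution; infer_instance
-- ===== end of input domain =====

-- B replaces A's single stack pass by repeatedly deleting the leftmost [1,2,3,1] window
-- until none remains (an alternative algorithm of similar cost); return values proved equal.

-- ===== PORT A =====
-- the body of A's for-loop: append ele; if the top four read [1,2,3,1], count and pop them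
def stepA (s : Int × List Int) (ele : Int) : Int × List Int :=
  -- bucket = s.2 ++ [ele] after bucket.append(ele)
  if PySem.List.slice (s.2 ++ [ele]) (some (-4)) none = [1, 2, 3, 1] then
    (s.1 + 1, PySem.List.slice (s.2 ++ [ele]) none (some (-4)))   -- del bucket[-4::]
  else (s.1, s.2 ++ [ele])

def solution (ingredient : List Int) : Int :=
  (ingredient.foldl stepA ((0 : Int), ([] : List Int))).1

-- ===== PORT B =====
-- _find: index of the leftmost window lst[i:i+4] == [1,2,3,1], scanning i = 0, 1, …
def findPat : List Int → Option Nat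
  | [] => none
  | x :: t =>
      if (x :: t).take 4 = [1, 2, 3, 1] then some 0
      else (findPat t).map (· + 1)

-- cited by altGo's decreasing_by: a found window lies inside the list
theorem findPat_bound : ∀ {l : List Int} {i : Nat}, findPat l = some i → i + 4 ≤ l.length := by
  intro l
  induction l with
  | nil => intro i h; simp [findPat] at h
  | cons x t ih =>
    intro i h
    by_cases hc : (x :: t).take 4 = [1, 2, 3, 1]
    · simp only [findPat, if_pos hc, Option.some.injEq] at h
      have h4 : ((x :: t).take 4).length = 4 := by rw [hc]; rfl
      simp only [List.length_take, List.length_cons] at h4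
      simp only [List.length_cons]
      omega
    · simp only [findPat, if_neg hc, Option.map_eq_some_iff] at h
      obtain ⟨j, hj, hij⟩ := h
      have := ih hj
      simp only [List.length_cons]
      omega

-- B's outer while-loop: find the leftmost window, delete those four elements, count, repeat
def altGo (l : List Int) : Int :=
  match h : findPat l with
  | none => 0
  | some i => 1 + altGo (l.take i ++ l.drop (i + 4))
termination_by l.length
decreasing_by
  have hb := findPat_bound h
  simp only [List.length_append, List.length_take, List.length_drop]
  omega

def solution_alt (ingredient : List Int) : Int := altGo ingredient

-- ===== PRECONDITION & SPEC =====
def Spec_solution (ingredient : List Int) (out : Int) : Prop := out = solution_alt ingredient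
instance (ingredient : List Int) (out : Int) : Decidable (Spec_solution ingredient out) := by unfold Spec_solution; infer_instance

-- ===== CLAIM (what is proved, stated in full; the proofs are below) =====
def Claim_equal_solution : Prop := ∀ (ingredient : List Int), Dom_solution ingredient → Spec_solution ingredient (solution ingredient)

-- ===== LEMMAS AND PROOFS =====

theorem altGo_none {l : List Int} (h : findPat l = none) : altGo l = 0 := by
  rw [altGo]; split <;> simp_all

theorem altGo_some {l : List Int} {i : Nat} (h : findPat l = some i) :
    altGo l = 1 + altGo (l.take i ++ l.drop (i + 4)) := by
  rw [altGo]; split <;> simp_all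

theorem take4_prefix {l : List Int} (h : l.take 4 = [1, 2, 3, 1]) :
    [1, 2, 3, 1] <+: l := h ▸ List.take_prefix 4 l

theorem findPat_none_of_noInfix : ∀ {l : List Int},
    ¬ [1, 2, 3, 1] <:+: l → findPat l = none := by
  intro l
  induction l with
  | nil => intro _; rfl
  | cons x t ih =>
    intro h
    rw [findPat, if_neg (fun hc => h (take4_prefix hc).isInfix),
        ih (fun ht => h (List.infix_cons ht))]
    rfl

theorem infix_concat_cases {l m : List Int} {x : Int} (h : l <:+: m ++ [x]) :
    l <:+: m ∨ l <:+ (m ++ [x]) := by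
  obtain ⟨s, t, hst⟩ := h
  rcases List.eq_nil_or_concat t with rfl | ⟨t', y, rfl⟩
  · right; exact ⟨s, by simpa using hst⟩
  · left
    rw [List.concat_eq_append, ← List.append_assoc] at hst
    obtain ⟨h1, -⟩ := List.append_inj' hst rfl
    exact ⟨s, t', h1⟩

theorem suffix_drop {l m : List Int} (h : l <:+ m) :
    m.drop (m.length - l.length) = l := by
  obtain ⟨s, rfl⟩ := h
  have hl : (s ++ l).length - l.length = s.length := by simp
  rw [hl, List.drop_left]

theorem findPat_append : ∀ (b' rest : List Int),
    ¬ [1, 2, 3, 1] <:+: (b' ++ [1, 2, 3]) →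
    findPat (b' ++ [1, 2, 3, 1] ++ rest) = some b'.length := by
  intro b'
  induction b' with
  | nil => intro rest _; simp [findPat]
  | cons x b'' ih =>
    intro rest h
    have hx : (x :: b'') ++ [1, 2, 3, 1] ++ rest = x :: (b'' ++ [1, 2, 3, 1] ++ rest) := by
      simp
    rw [hx, findPat, if_neg, ih rest (fun hi => h (List.infix_cons hi))]
    · simp
    · intro hc
      have hpre := take4_prefix hc
      have hsplit : x :: (b'' ++ [1, 2, 3, 1] ++ rest)
          = (x :: b'' ++ [1, 2, 3]) ++ (1 :: rest) := by simp
      rw [hsplit] at hpre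
      have heq := List.prefix_iff_eq_take.mp hpre
      rw [show ([1, 2, 3, 1] : List Int).length = 4 from rfl, List.take_append] at heq
      have hz : 4 - (x :: b'' ++ [1, 2, 3]).length = 0 := by simp
      rw [hz, List.take_zero, List.append_nil] at heq
      exact h (heq ▸ List.take_prefix 4 (x :: b'' ++ [1, 2, 3])).isInfix

theorem foldA_eq : ∀ (rest bucket : List Int) (cnt : Int),
    ¬ [1, 2, 3, 1] <:+: bucket →
    (List.foldl stepA (cnt, bucket) rest).1 = cnt + altGo (bucket ++ rest) := by
  intro rest
  induction rest with
  | nil =>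
    intro bucket cnt h
    simp [altGo_none (findPat_none_of_noInfix h)]
  | cons ele tail ih =>
    intro bucket cnt h
    rw [List.foldl_cons]
    have hstep : stepA (cnt, bucket) ele =
        if (bucket ++ [ele]).drop ((bucket ++ [ele]).length - 4) = [1, 2, 3, 1]
        then (cnt + 1, (bucket ++ [ele]).take ((bucket ++ [ele]).length - 4))
        else (cnt, bucket ++ [ele]) := by
      have h0 : stepA (cnt, bucket) ele =
          if PySem.List.slice (bucket ++ [ele]) (some (-4)) none = [1, 2, 3, 1]
          then (cnt + 1, PySem.List.slice (bucket ++ [ele]) none (some (-4)))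
          else (cnt, bucket ++ [ele]) := rfl
      rw [h0, PySem.List.slice_from_neg_ofNat (bucket ++ [ele]) 4 (by omega),
          PySem.List.slice_to_neg_ofNat (bucket ++ [ele]) 4 (by omega)]
    by_cases hc : (bucket ++ [ele]).drop ((bucket ++ [ele]).length - 4) = [1, 2, 3, 1]
    · rw [hstep, if_pos hc]
      have hdecomp : bucket ++ [ele]
          = (bucket ++ [ele]).take ((bucket ++ [ele]).length - 4) ++ [1, 2, 3, 1] := by
        conv_lhs => rw [← List.take_append_drop ((bucket ++ [ele]).length - 4) (bucket ++ [ele])]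
        rw [hc]
      set b1 := (bucket ++ [ele]).take ((bucket ++ [ele]).length - 4) with hb1
      have hket : bucket = b1 ++ [1, 2, 3] ∧ ele = 1 := by
        have heq : bucket ++ [ele] = (b1 ++ [1, 2, 3]) ++ [(1 : Int)] := by
          rw [hdecomp]; simp
        have h2 := List.append_inj' heq rfl
        exact ⟨h2.1, by simpa using h2.2⟩
      have hb1noP : ¬ [1, 2, 3, 1] <:+: b1 := by
        intro hi; apply h; rw [hket.1]
        exact hi.trans (List.prefix_append b1 [1, 2, 3]).isInfix
      rw [ih b1 (cnt + 1) hb1noP]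
      have harr : bucket ++ ele :: tail = b1 ++ [1, 2, 3, 1] ++ tail := by
        rw [List.append_cons, hdecomp]
      rw [harr]
      have hfind := findPat_append b1 tail (by rw [← hket.1]; exact h)
      rw [altGo_some hfind]
      have htake : (b1 ++ [1, 2, 3, 1] ++ tail).take b1.length = b1 := by
        rw [List.append_assoc]; exact List.take_left' rfl
      have hdrop : (b1 ++ [1, 2, 3, 1] ++ tail).drop (b1.length + 4) = tail := by
        exact List.drop_left' (by simp)
      rw [htake, hdrop]
      ring
    · have hnoP : ¬ [1, 2, 3, 1] <:+: (bucket ++ [ele]) := by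
        intro hi
        rcases infix_concat_cases hi with h1 | h2
        · exact h h1
        · exact hc (by simpa using suffix_drop h2)
      rw [hstep, if_neg hc, ih (bucket ++ [ele]) cnt hnoP]
      simp


-- ===== VERDICT (by name: the statement is the Claim_ definition above) =====
theorem solution_spec : Claim_equal_solution := by
  intro ingredient _
  unfold Spec_solution solution solution_alt
  simpa using foldA_eq ingredient [] 0 (by simp)
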